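-- pv_equiv track=rewrite | github.com/max12330/Automata-Theory | задание 2/2.py | eval_table
-- ===== SOURCE A (Python) =====
-- def eval_table(coeffs, mod):
--     #вычисляет значения полинома для всех элементов кольца
--     n = len(coeffs)
--     xs = list(range(mod))
--     vals = []
--     for x in xs:
--         acc = 0
--         pw = 1
--         for j in range(n):
--             acc = (acc + coeffs[j] * pw) % mod
--             pw = (pw * x) % mod
--         vals.append(acc)
--     return xs, vals
-- ===== SOURCE B (Python) =====
-- def eval_table(coeffs, mod):
--     # Vectorized Horner: whole table of values updated per coefficient,
--     # back-to-front, instead of a per-residue inner loop with a power accumulator.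
--     xs = list(range(mod))
--     vals = [0] * mod
--     for c in reversed(coeffs):
--         vals = [(v * x + c) % mod for x, v in zip(xs, vals)]
--     return xs, vals
-- ===== Notes on version B (the rewrite author's own statement) =====
-- stated objective: alternative
-- what changed: Swapped the loop nesting: instead of a per-residue inner loop maintaining a power accumulator, B runs one pass per coefficient (back-to-front, vectorized Horner) that updates the whole table of values at once via zip, so the power variable and the per-x inner loop disappear.
import Mathlib
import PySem

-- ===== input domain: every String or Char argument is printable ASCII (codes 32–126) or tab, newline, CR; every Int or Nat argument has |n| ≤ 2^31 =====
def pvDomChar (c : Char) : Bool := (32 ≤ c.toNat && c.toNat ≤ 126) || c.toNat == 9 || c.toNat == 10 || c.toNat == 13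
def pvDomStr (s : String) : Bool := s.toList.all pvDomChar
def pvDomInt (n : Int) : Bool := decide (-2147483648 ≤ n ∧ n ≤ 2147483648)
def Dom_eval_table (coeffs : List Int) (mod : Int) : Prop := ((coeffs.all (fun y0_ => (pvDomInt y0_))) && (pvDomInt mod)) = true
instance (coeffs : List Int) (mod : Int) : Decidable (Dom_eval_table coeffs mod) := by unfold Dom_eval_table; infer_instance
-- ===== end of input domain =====

-- B swaps the loop nesting: one vectorized Horner pass per coefficient over the whole value table (alternative; same cost).

-- ===== PORT A =====
-- inner loop of A: for j in range(n): acc = (acc + coeffs[j]*pw) % mod; pw = (pw*x) % mod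
def evalA_inner (coeffs : List Int) (m x : Int) : Int × Int :=
  (PySem.List.pyRange 0 (coeffs.length : Int) 1).foldl
    (fun ap j => (PySem.Int.mod (ap.1 + PySem.List.pyGetD coeffs j 0 * ap.2) m,
                  PySem.Int.mod (ap.2 * x) m)) (0, 1)

def eval_table (coeffs : List Int) (mod : Int) : List Int × List Int :=
  let xs := PySem.List.pyRange 0 mod 1
  let vals := xs.foldl (fun vals x => vals ++ [(evalA_inner coeffs mod x).1]) []
  (xs, vals)

-- ===== PORT B =====
-- B: vals = [0]*mod; for c in reversed(coeffs): vals = [(v*x + c) % mod for x, v in zip(xs, vals)]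
def eval_table_alt (coeffs : List Int) (mod : Int) : List Int × List Int :=
  let xs := PySem.List.pyRange 0 mod 1
  let vals := coeffs.reverse.foldl
    (fun vals c => (xs.zip vals).map (fun xv => PySem.Int.mod (xv.2 * xv.1 + c) mod))
    (List.replicate mod.toNat 0)
  (xs, vals)

-- ===== PRECONDITION & SPEC =====
def Spec_eval_table (coeffs : List Int) (mod : Int) (out : List Int × List Int) : Prop := out = eval_table_alt coeffs mod
instance (coeffs : List Int) (mod : Int) (out : List Int × List Int) : Decidable (Spec_eval_table coeffs mod out) := by unfold Spec_eval_table; infer_instance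

-- ===== CLAIM (what is proved, stated in full; the proofs are below) =====
def Claim_equal_eval_table : Prop := ∀ (coeffs : List Int) (mod : Int), Dom_eval_table coeffs mod → Spec_eval_table coeffs mod (eval_table coeffs mod)

-- ===== LEMMAS AND PROOFS =====

-- the mathematical polynomial value (Horner form of Σ coeffs[j] * x^j)
def horner (coeffs : List Int) (x : Int) : Int :=
  coeffs.foldr (fun c r => c + x * r) 0

lemma emod_fold_step (a c p x h m : Int) :
    ((a + c * p) % m + ((p * x) % m) * h) % m = (a + c * p + p * x * h) % m := by
  conv_lhs => rw [Int.add_emod, Int.mul_emod]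
  conv_rhs => rw [Int.add_emod, Int.mul_emod]
  simp [Int.emod_emod_of_dvd]

lemma evalA_fold (m x : Int) (coeffs : List Int) :
    ∀ a p : Int, a % m = a →
      (coeffs.foldl (fun ap c => ((ap.1 + c * ap.2) % m, (ap.2 * x) % m)) (a, p)).1
        = (a + p * horner coeffs x) % m := by
  induction coeffs with
  | nil => intro a p ha; simp [horner, ha]
  | cons c cs ih =>
    intro a p ha
    simp only [List.foldl_cons]
    rw [ih ((a + c * p) % m) ((p * x) % m) (Int.emod_emod_of_dvd _ (dvd_refl m)),
        emod_fold_step]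
    have : a + c * p + p * x * horner cs x = a + p * horner (c :: cs) x := by
      simp [horner]; ring
    rw [this]

lemma evalA_inner_eq (coeffs : List Int) (m x : Int) (hm : 0 < m) :
    (evalA_inner coeffs m x).1 = (horner coeffs x) % m := by
  unfold evalA_inner
  simp only [PySem.Int.mod_eq_emod_of_pos hm]
  rw [PySem.List.foldl_pyRange_zero_pyGetD' coeffs 0
        (fun ap c => ((ap.1 + c * ap.2) % m, (ap.2 * x) % m)) (0, 1)]
  rw [evalA_fold m x coeffs 0 1 (by simp)]
  simp

-- per-residue meaning of one B pass, once the table is a map over xs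
lemma cellB_eq (coeffs : List Int) (m x : Int) :
    coeffs.reverse.foldl (fun a c => (a * x + c) % m) 0 = (horner coeffs x) % m := by
  simp only [List.foldl_reverse]
  induction coeffs with
  | nil => simp [horner]
  | cons c cs ih =>
    simp only [List.foldr_cons, ih]
    have : horner (c :: cs) x = c + x * horner cs x := by simp [horner]
    rw [this]
    conv_lhs => rw [Int.add_emod, Int.mul_emod]
    conv_rhs => rw [Int.add_emod, Int.mul_emod]
    simp [Int.emod_emod_of_dvd, Int.add_comm, Int.mul_comm]

-- A's append-accumulation is a map
lemma foldl_append_map (xs : List Int) (f : Int → Int) :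
    ∀ acc : List Int, xs.foldl (fun vals x => vals ++ [f x]) acc = acc ++ xs.map f := by
  induction xs with
  | nil => simp
  | cons x xs ih => intro acc; simp [ih]

-- zipping xs with a map over xs
lemma zip_map_self {α β : Type} (xs : List α) (g : α → β) :
    xs.zip (xs.map g) = xs.map (fun x => (x, g x)) := by
  induction xs with
  | nil => rfl
  | cons x xs ih => simp [ih]

-- one B pass on a mapped table stays a mapped table; fold over all coefficients
lemma passB_fold (m : Int) (xs : List Int) (cs : List Int) :
    ∀ g : Int → Int,
      cs.foldl (fun vals c => (xs.zip vals).map (fun xv => (xv.2 * xv.1 + c) % m)) (xs.map g)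
        = xs.map (fun x => cs.foldl (fun a c => (a * x + c) % m) (g x)) := by
  induction cs with
  | nil => intro g; rfl
  | cons c cs ih =>
    intro g
    simp only [List.foldl_cons]
    rw [zip_map_self, List.map_map]
    have h1 : (xs.map (fun x => (x, g x))).map (fun xv => (xv.2 * xv.1 + c) % m)
        = xs.map (fun x => (g x * x + c) % m) := by
      simp [List.map_map, Function.comp]
    rw [show ((fun xv : Int × Int => (xv.2 * xv.1 + c) % m) ∘ fun x => (x, g x))
          = fun x => (g x * x + c) % m from rfl]
    exact ih (fun x => (g x * x + c) % m)

lemma replicate_as_map (xs : List Int) :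
    List.replicate xs.length (0 : Int) = xs.map (fun _ => 0) := by
  induction xs with
  | nil => rfl
  | cons x xs ih => simp only [List.length_cons, List.replicate_succ, List.map_cons, ih]

-- ===== VERDICT (by name: the statement is the Claim_ definition above) =====
theorem eval_table_spec : Claim_equal_eval_table := by
  intro coeffs m _
  unfold Spec_eval_table eval_table eval_table_alt
  by_cases hm : 0 < m
  · have hlen : (PySem.List.pyRange 0 m 1).length = m.toNat := by
      simp [PySem.List.length_pyRange_one]
    simp only [foldl_append_map]
    have hrep : List.replicate m.toNat (0 : Int)
        = (PySem.List.pyRange 0 m 1).map (fun _ => 0) := by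
      rw [← hlen, replicate_as_map]
    rw [hrep]
    have hstep : (fun (vals : List Int) (c : Int) =>
        ((PySem.List.pyRange 0 m 1).zip vals).map (fun xv => PySem.Int.mod (xv.2 * xv.1 + c) m))
        = fun vals c => ((PySem.List.pyRange 0 m 1).zip vals).map (fun xv => (xv.2 * xv.1 + c) % m) := by
      funext vals c
      simp [PySem.Int.mod_eq_emod_of_pos hm]
    rw [hstep, passB_fold m (PySem.List.pyRange 0 m 1) coeffs.reverse (fun _ => 0)]
    refine congrArg _ (congrArg _ (List.map_congr_left fun x _ => ?_))
    rw [evalA_inner_eq coeffs m x hm, cellB_eq coeffs m x]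
  · rw [PySem.List.pyRange_one_eq_nil (by omega)]
    have : m.toNat = 0 := by omega
    rw [this]
    simp only [List.replicate_zero, List.foldl_reverse, List.foldl_nil,
      List.zip_nil_left, List.map_nil]
    cases coeffs <;> rfl
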